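-- pv_equiv track=rewrite | github.com/peterhil/serpent | src/serpent/math/statistic.py | pulse_repetition_intervals
-- ===== SOURCE A (Python) =====
-- from collections import Counter, OrderedDict, defaultdict
-- from collections.abc import Callable, Iterable
--
-- def pulse_repetition_intervals(data: Iterable[str]):
-- 	"""Pulse repetition intervals for each symbol of data.
--
-- 	See: https://en.wikipedia.org/wiki/Pulse_width
-- 	"""
-- 	last = OrderedDict()
-- 	stat = defaultdict(list)
-- 	max_length = 0
--
-- 	for index, sym in enumerate(data):
-- 		previous = last.get(sym, 0)
-- 		last[sym] = index
-- 		run = index - previous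
-- 		max_length = max(run, max_length)
-- 		stat[sym].append(run)
--
-- 	return stat, max_length
-- ===== SOURCE B (Python) =====
-- from collections import defaultdict
--
--
-- def pulse_repetition_intervals(data):
-- 	"""Pulse repetition intervals for each symbol of data.
--
-- 	Group-then-diff: first index the positions of each symbol, then turn
-- 	each position list into interval runs and fold the running maximum.
-- 	"""
-- 	table = defaultdict(list)
-- 	for index, sym in enumerate(data):
-- 		table[sym].append(index)
--
-- 	stat = defaultdict(list)
-- 	max_length = 0
-- 	for sym, positions in table.items():
-- 		prev = 0
-- 		for i in positions:
-- 			run = i - prev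
-- 			stat[sym].append(run)
-- 			prev = i
-- 			max_length = max(run, max_length)
--
-- 	return stat, max_length
-- ===== Notes on version B (the rewrite author's own statement) =====
-- stated objective: alternative
-- what changed: Replaces A's single interleaved pass (tracking last-occurrence, runs and max together) with a group-then-diff decomposition: one pass builds a position index per symbol, a second phase differences each position list and folds the maximum.
import Mathlib
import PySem

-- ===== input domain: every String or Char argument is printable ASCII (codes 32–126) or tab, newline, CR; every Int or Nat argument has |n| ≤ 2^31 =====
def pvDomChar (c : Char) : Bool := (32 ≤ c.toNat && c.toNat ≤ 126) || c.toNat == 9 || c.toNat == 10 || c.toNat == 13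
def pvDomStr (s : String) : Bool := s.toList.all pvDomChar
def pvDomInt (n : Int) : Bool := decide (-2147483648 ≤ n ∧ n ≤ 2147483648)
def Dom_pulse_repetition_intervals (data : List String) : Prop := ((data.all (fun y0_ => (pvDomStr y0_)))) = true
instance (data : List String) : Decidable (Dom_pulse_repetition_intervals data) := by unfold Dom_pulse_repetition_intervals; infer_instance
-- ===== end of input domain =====

-- B replaces A's single interleaved pass with a group-then-diff decomposition (alternative, same cost).


-- ===== PORT A =====
-- one pass over enumerate(data); state = (last, stat, max_length)
def pulse_repetition_intervals (data : List String) : (List (String × List Int)) × Int :=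
  let st := (PySem.List.enumerate data).foldl
    (fun (s : PySem.Dict String Int × PySem.Dict String (List Int) × Int) (p : Int × String) =>
      (s.1.insert p.2 p.1,
       s.2.1.modify p.2 [] (fun l => l ++ [p.1 - s.1.getD p.2 0]),
       max (p.1 - s.1.getD p.2 0) s.2.2))
    (PySem.Dict.empty, PySem.Dict.empty, 0)
  (st.2.1.items, st.2.2)

-- ===== PORT B =====
-- phase 1: position index per symbol; phase 2: diff each position list, folding the max
def pulse_repetition_intervals_alt (data : List String) : (List (String × List Int)) × Int :=
  let table := (PySem.List.enumerate data).foldl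
    (fun (t : PySem.Dict String (List Int)) (p : Int × String) =>
      t.modify p.2 [] (fun l => l ++ [p.1]))
    PySem.Dict.empty
  let st := table.items.foldl
    (fun (s : PySem.Dict String (List Int) × Int) (kv : String × List Int) =>
      let inner := kv.2.foldl
        (fun (u : PySem.Dict String (List Int) × Int × Int) (i : Int) =>
          (u.1.modify kv.1 [] (fun l => l ++ [i - u.2.1]), i, max (i - u.2.1) u.2.2))
        (s.1, 0, s.2)
      (inner.1, inner.2.2))
    (PySem.Dict.empty, 0)
  (st.1.items, st.2)

-- ===== PRECONDITION & SPEC =====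
def Spec_pulse_repetition_intervals (data : List String) (out : (List (String × List Int)) × Int) : Prop := out = pulse_repetition_intervals_alt data
instance (data : List String) (out : (List (String × List Int)) × Int) : Decidable (Spec_pulse_repetition_intervals data out) := by unfold Spec_pulse_repetition_intervals; infer_instance

-- ===== CLAIM (what is proved, stated in full; the proofs are below) =====
def Claim_equal_pulse_repetition_intervals : Prop := ∀ (data : List String), Dom_pulse_repetition_intervals data → Spec_pulse_repetition_intervals data (pulse_repetition_intervals data)

-- ===== LEMMAS AND PROOFS =====

-- interval runs of a position list, with previous position `prev`
def pvRuns (prev : Int) : List Int → List Int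
  | [] => []
  | i :: t => (i - prev) :: pvRuns i t

-- last element, default `prev`
def pvLast (prev : Int) : List Int → Int
  | [] => prev
  | i :: t => pvLast i t

-- running maximum as both programs fold it
def pvMax (m : Int) (l : List Int) : Int := l.foldl (fun m r => max r m) m

def pvAllRuns (l : List (String × List Int)) : List Int :=
  (l.map (fun p => pvRuns 0 p.2)).flatten

theorem pvLast_snoc (p i : Int) (xs : List Int) : pvLast p (xs ++ [i]) = i := by
  induction xs generalizing p with
  | nil => rfl
  | cons x t ih => simpa [pvLast] using ih x

theorem pvRuns_snoc (p i : Int) (xs : List Int) :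
    pvRuns p (xs ++ [i]) = pvRuns p xs ++ [i - pvLast p xs] := by
  induction xs generalizing p with
  | nil => rfl
  | cons x t ih => simp [pvRuns, pvLast, ih x]

theorem pvMax_append (m : Int) (xs ys : List Int) :
    pvMax m (xs ++ ys) = pvMax (pvMax m xs) ys := by
  simp [pvMax, List.foldl_append]

theorem pvMax_max (r m : Int) (ys : List Int) :
    pvMax (max r m) ys = max r (pvMax m ys) := by
  induction ys generalizing m with
  | nil => rfl
  | cons y t ih => simpa [pvMax, max_left_comm] using ih (max y m)

theorem pvMax_middle (m r : Int) (A R B : List Int) :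
    pvMax m (A ++ (R ++ [r]) ++ B) = max r (pvMax m (A ++ R ++ B)) := by
  rw [pvMax_append, pvMax_append, show pvMax (pvMax m A) (R ++ [r]) = max r (pvMax (pvMax m A) R) by
    simp [pvMax], pvMax_max, ← pvMax_append, ← pvMax_append, List.append_assoc]

theorem modify_modify_self (d : PySem.Dict String (List Int)) (k : String) (f g : List Int → List Int) :
    (d.modify k [] f).modify k [] g = d.modify k [] (fun l => g (f l)) := by
  simp [PySem.Dict.modify, PySem.Dict.getD_insert_self, PySem.Dict.insert_insert_self]

-- the inner loop of B's second phase
theorem inner_eq (k : String) (x : Int) (t : List Int) :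
    ∀ (stat : PySem.Dict String (List Int)) (prev m : Int),
    (x :: t).foldl
      (fun (u : PySem.Dict String (List Int) × Int × Int) (i : Int) =>
        (u.1.modify k [] (fun l => l ++ [i - u.2.1]), i, max (i - u.2.1) u.2.2))
      (stat, prev, m)
    = (stat.modify k [] (fun l => l ++ pvRuns prev (x :: t)), pvLast prev (x :: t),
       pvMax m (pvRuns prev (x :: t))) := by
  induction t generalizing x with
  | nil => intro stat prev m; simp [pvRuns, pvLast, pvMax]
  | cons y t' ih =>
    intro stat prev m
    rw [List.foldl_cons, ih y (stat.modify k [] (fun l => l ++ [x - prev])) x (max (x - prev) m)]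
    simp [modify_modify_self, pvRuns, pvLast, pvMax, List.append_assoc]

-- the outer loop of B's second phase
theorem outer_eq :
    ∀ (l : List (String × List Int)) (stat : PySem.Dict String (List Int)) (m : Int),
    (∀ p ∈ l, p.2 ≠ [] ∧ stat.contains p.1 = false) → (l.map Prod.fst).Nodup →
    l.foldl
      (fun (s : PySem.Dict String (List Int) × Int) (kv : String × List Int) =>
        ((kv.2.foldl
          (fun (u : PySem.Dict String (List Int) × Int × Int) (i : Int) =>
            (u.1.modify kv.1 [] (fun l => l ++ [i - u.2.1]), i, max (i - u.2.1) u.2.2))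
          (s.1, 0, s.2)).1,
         (kv.2.foldl
          (fun (u : PySem.Dict String (List Int) × Int × Int) (i : Int) =>
            (u.1.modify kv.1 [] (fun l => l ++ [i - u.2.1]), i, max (i - u.2.1) u.2.2))
          (s.1, 0, s.2)).2.2))
      (stat, m)
    = (PySem.Dict.mk (stat.items ++ l.map (fun p => (p.1, pvRuns 0 p.2))), pvMax m (pvAllRuns l)) := by
  intro l
  induction l with
  | nil =>
    intro stat m _ _
    simp [pvAllRuns, pvMax]
  | cons hd tl ih =>
    obtain ⟨k, poss⟩ := hd
    intro stat m hcond hnodup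
    obtain ⟨hne, hcont⟩ := hcond (k, poss) List.mem_cons_self
    cases poss with
    | nil => exact absurd rfl hne
    | cons x t =>
      rw [List.foldl_cons]
      rw [inner_eq k x t stat 0 m]
      have hmod : stat.modify k [] (fun l => l ++ pvRuns 0 (x :: t))
          = stat.insert k (pvRuns 0 (x :: t)) := by
        simp [PySem.Dict.modify, PySem.Dict.getD_of_not_contains _ _ hcont]
      have hnodup2 : (k :: tl.map Prod.fst).Nodup := by
        simpa only [List.map_cons] using hnodup
      have hk : k ∉ tl.map Prod.fst := (List.nodup_cons.mp hnodup2).1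
      have hcond' : ∀ p ∈ tl, p.2 ≠ [] ∧ (stat.insert k (pvRuns 0 (x :: t))).contains p.1 = false := by
        intro p hp
        refine ⟨(hcond p (List.mem_cons_of_mem _ hp)).1, ?_⟩
        rw [PySem.Dict.contains_insert]
        have hpk : p.1 ≠ k := fun h => hk (h ▸ List.mem_map_of_mem hp)
        simp [hpk, (hcond p (List.mem_cons_of_mem _ hp)).2]
      have hnodup' : (tl.map Prod.fst).Nodup := (List.nodup_cons.mp hnodup2).2
      simp only [hmod]
      rw [ih (stat.insert k (pvRuns 0 (x :: t))) (pvMax m (pvRuns 0 (x :: t))) hcond' hnodup']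
      simp [PySem.Dict.items_insert_of_not_contains _ _ hcont, pvAllRuns, pvMax_append]

-- A's single pass, related to B's phase-1 table
theorem main_inv :
    ∀ (es : List (Int × String)) (last : PySem.Dict String Int)
      (stat : PySem.Dict String (List Int)) (maxl : Int) (table : PySem.Dict String (List Int)),
    stat.items = table.items.map (fun p => (p.1, pvRuns 0 p.2)) →
    (∀ k, last.getD k 0 = pvLast 0 (table.getD k [])) →
    maxl = pvMax 0 (pvAllRuns table.items) →
    table.keys.Nodup →
    (∀ p ∈ table.items, p.2 ≠ []) →
    (es.foldl
      (fun (s : PySem.Dict String Int × PySem.Dict String (List Int) × Int) (p : Int × String) =>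
        (s.1.insert p.2 p.1,
         s.2.1.modify p.2 [] (fun l => l ++ [p.1 - s.1.getD p.2 0]),
         max (p.1 - s.1.getD p.2 0) s.2.2))
      (last, stat, maxl)).2
    = (let T := es.foldl
        (fun (t : PySem.Dict String (List Int)) (p : Int × String) =>
          t.modify p.2 [] (fun l => l ++ [p.1]))
        table
       (PySem.Dict.mk (T.items.map (fun p => (p.1, pvRuns 0 p.2))), pvMax 0 (pvAllRuns T.items)))
      ∧ (es.foldl
          (fun (t : PySem.Dict String (List Int)) (p : Int × String) =>
            t.modify p.2 [] (fun l => l ++ [p.1]))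
          table).keys.Nodup
      ∧ (∀ p ∈ (es.foldl
          (fun (t : PySem.Dict String (List Int)) (p : Int × String) =>
            t.modify p.2 [] (fun l => l ++ [p.1]))
          table).items, p.2 ≠ []) := by
  intro es
  induction es with
  | nil =>
    intro last stat maxl table hstat hlast hmax hnodup hne
    exact ⟨Prod.ext (PySem.Dict.ext hstat) hmax, hnodup, hne⟩
  | cons q es ih =>
    obtain ⟨idx, sym⟩ := q
    intro last stat maxl table hstat hlast hmax hnodup hne
    simp only [List.foldl_cons]
    have hkeys : stat.keys = table.keys := by
      simp [PySem.Dict.keys, hstat, List.map_map, Function.comp]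
    have hcont : stat.contains sym = table.contains sym := by
      rw [PySem.Dict.contains_eq_decide_mem_keys, PySem.Dict.contains_eq_decide_mem_keys, hkeys]
    have hSnodup : stat.keys.Nodup := hkeys ▸ hnodup
    by_cases hc : table.contains sym = true
    · -- sym already present in the table
      obtain ⟨v, hv⟩ : ∃ v, table.get? sym = some v := by
        have h0 := PySem.Dict.contains_eq_isSome_get? table sym
        rw [hc] at h0
        exact Option.isSome_iff_exists.mp h0.symm
      have hmem : (sym, v) ∈ table.items := PySem.Dict.mem_items_of_get?_eq_some table hv
      have hgD : table.getD sym [] = v := PySem.Dict.getD_of_get?_eq_some table [] hv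
      have hmemS : (sym, pvRuns 0 v) ∈ stat.items := by
        rw [hstat]; exact List.mem_map_of_mem hmem
      have hgDS : stat.getD sym [] = pvRuns 0 v :=
        PySem.Dict.getD_of_mem_items stat hmemS hSnodup []
      have hprev : last.getD sym 0 = pvLast 0 v := by rw [hlast sym, hgD]
      have hScont : stat.contains sym = true := hcont.trans hc
      have hT1 : table.modify sym [] (fun l => l ++ [idx]) = table.insert sym (v ++ [idx]) := by
        simp [PySem.Dict.modify, hgD]
      have hS1 : stat.modify sym [] (fun l => l ++ [idx - last.getD sym 0])
          = stat.insert sym (pvRuns 0 v ++ [idx - last.getD sym 0]) := by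
        simp [PySem.Dict.modify, hgDS]
      obtain ⟨l1, l2, hsplit⟩ := List.append_of_mem hmem
      have hnm : sym ∉ l1.map Prod.fst ++ l2.map Prod.fst := by
        have h0 : (l1.map Prod.fst ++ sym :: l2.map Prod.fst).Nodup := by
          have h1 := hnodup
          rw [show table.keys = l1.map Prod.fst ++ sym :: l2.map Prod.fst by
            simp [PySem.Dict.keys, hsplit]] at h1
          exact h1
        have h2 := List.nodup_middle.mp h0
        have h3 := List.nodup_cons.mp h2
        exact h3.1
      have hl1 : ∀ p ∈ l1, p.1 ≠ sym := by
        intro p hp h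
        exact hnm (List.mem_append_left _ (h ▸ List.mem_map_of_mem hp))
      have hl2 : ∀ p ∈ l2, p.1 ≠ sym := by
        intro p hp h
        exact hnm (List.mem_append_right _ (h ▸ List.mem_map_of_mem hp))
      refine ih _ _ _ _ ?_ ?_ ?_ ?_ ?_
      · -- stat invariant
        rw [hS1, hT1, PySem.Dict.items_insert_of_contains _ _ hScont,
          PySem.Dict.items_insert_of_contains _ _ hc, hstat, List.map_map, List.map_map]
        refine List.map_congr_left ?_
        intro p hp
        by_cases hpk : p.1 = sym
        · simp [Function.comp, hpk, hprev, pvRuns_snoc]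
        · simp [Function.comp, hpk]
      · -- last invariant
        intro k'
        by_cases hk' : k' = sym
        · subst hk'
          simp [hT1, PySem.Dict.getD_insert_self, pvLast_snoc]
        · simp [hT1, PySem.Dict.getD_insert_of_ne _ _ _ hk', hlast k']
      · -- max invariant
        rw [hT1, PySem.Dict.items_insert_of_contains _ _ hc, hsplit]
        have hml1 : l1.map (fun p => if (p.1 == sym) = true then (sym, v ++ [idx]) else p) = l1 := by
          conv_rhs => rw [← List.map_id l1]
          exact List.map_congr_left (fun p hp => by simp [hl1 p hp])
        have hml2 : l2.map (fun p => if (p.1 == sym) = true then (sym, v ++ [idx]) else p) = l2 := by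
          conv_rhs => rw [← List.map_id l2]
          exact List.map_congr_left (fun p hp => by simp [hl2 p hp])
        rw [List.map_append, List.map_cons, hml1, hml2]
        simp only [beq_self_eq_true, if_true]
        have hall : pvAllRuns (l1 ++ (sym, v ++ [idx]) :: l2)
            = pvAllRuns l1 ++ (pvRuns 0 v ++ [idx - pvLast 0 v]) ++ pvAllRuns l2 := by
          simp [pvAllRuns, pvRuns_snoc]
        rw [hall, pvMax_middle, ← hprev]
        rw [hmax, hsplit]
        have hall2 : pvAllRuns (l1 ++ (sym, v) :: l2)
            = pvAllRuns l1 ++ pvRuns 0 v ++ pvAllRuns l2 := by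
          simp [pvAllRuns]
        rw [hall2]
      · rw [hT1]; exact PySem.Dict.nodup_keys_insert _ _ _ hnodup
      · rw [hT1]
        intro p hp
        rcases (PySem.Dict.mem_items_insert _ _ _ _).mp hp with h | h
        · subst h; simp
        · exact hne p h.1
    · -- sym not yet in the table
      have hc' : table.contains sym = false := by simpa using hc
      have hgD : table.getD sym [] = [] := PySem.Dict.getD_of_not_contains _ _ hc'
      have hScont : stat.contains sym = false := hcont.trans hc'
      have hprev : last.getD sym 0 = 0 := by rw [hlast sym, hgD]; rfl
      have hT1 : table.modify sym [] (fun l => l ++ [idx]) = table.insert sym [idx] := by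
        simp [PySem.Dict.modify, hgD]
      have hS1 : stat.modify sym [] (fun l => l ++ [idx - last.getD sym 0])
          = stat.insert sym [idx - last.getD sym 0] := by
        simp [PySem.Dict.modify, PySem.Dict.getD_of_not_contains _ _ hScont]
      refine ih _ _ _ _ ?_ ?_ ?_ ?_ ?_
      · rw [hS1, hT1, PySem.Dict.items_insert_of_not_contains _ _ hScont,
          PySem.Dict.items_insert_of_not_contains _ _ hc', hstat]
        simp [pvRuns, hprev]
      · intro k'
        by_cases hk' : k' = sym
        · subst hk'
          simp [hT1, PySem.Dict.getD_insert_self, pvLast]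
        · simp [hT1, PySem.Dict.getD_insert_of_ne _ _ _ hk', hlast k']
      · rw [hT1, PySem.Dict.items_insert_of_not_contains _ _ hc']
        simp [pvAllRuns, pvRuns, pvMax, hprev, hmax]
      · rw [hT1]; exact PySem.Dict.nodup_keys_insert _ _ _ hnodup
      · rw [hT1]
        intro p hp
        rcases (PySem.Dict.mem_items_insert _ _ _ _).mp hp with h | h
        · subst h; simp
        · exact hne p h.1

-- ===== VERDICT (by name: the statement is the Claim_ definition above) =====
theorem pulse_repetition_intervals_spec : Claim_equal_pulse_repetition_intervals := by
  intro data _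
  unfold Spec_pulse_repetition_intervals pulse_repetition_intervals pulse_repetition_intervals_alt
  obtain ⟨h1, h2, h3⟩ := main_inv (PySem.List.enumerate data) PySem.Dict.empty PySem.Dict.empty 0
    PySem.Dict.empty rfl (fun k => by simp [pvLast]) rfl (by simp)
    (by simp [PySem.Dict.empty])
  set T := (PySem.List.enumerate data).foldl
      (fun (t : PySem.Dict String (List Int)) (p : Int × String) =>
        t.modify p.2 [] (fun l => l ++ [p.1]))
      PySem.Dict.empty with hT
  have hcond : ∀ p ∈ T.items, p.2 ≠ [] ∧ (PySem.Dict.empty : PySem.Dict String (List Int)).contains p.1 = false := by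
    intro p hp; exact ⟨h3 p hp, by simp⟩
  have hnodup : (T.items.map Prod.fst).Nodup := h2
  have h4 := outer_eq T.items PySem.Dict.empty 0 hcond hnodup
  simp only []
  rw [h1]
  rw [h4]
  simp [PySem.Dict.empty]
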